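-- pv_equiv track=rewrite | github.com/swwho96/algo | programmers/Level_2/DeliveryBox.py | solution
-- ===== SOURCE A (Python) =====
-- def solution(order):
--     answer = 0
--     order = order[::-1]
--     backup = []
--     belt = [i for i in range(len(order), 0, -1)]
--     while order:
--         if belt and belt[-1] == order[-1]:
--             belt.pop()
--             order.pop()
--             answer += 1
--         elif backup and backup[-1] == order[-1]:
--             backup.pop()
--             order.pop()
--             answer += 1
--         else:
--             if belt:
--                 backup.append(belt.pop())
--             else:
--                 break
--     return answer
-- ===== SOURCE B (Python) =====
-- def solution(order):
--     n = len(order)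
--     delivered = [False] * (n + 1)
--     m = 0      # boxes 1..m have left the belt
--     t = 0      # max undelivered box number <= m (0 if none)
--     count = 0
--     for o in order:
--         if m < o <= n:
--             delivered[o] = True
--             if o - 1 > m:
--                 t = o - 1
--             m = o
--             count += 1
--         elif 0 < o == t:
--             delivered[o] = True
--             t -= 1
--             while t > 0 and delivered[t]:
--                 t -= 1
--             count += 1
--         else:
--             break
--     return count
-- ===== Notes on version B (the rewrite author's own statement) =====
-- stated objective: faster
-- what changed: A simulates the belt and the side stack as explicit Python lists with push/pop over a reversed copy of order; B keeps no stack at all: a boolean delivered-array, the belt watermark m and a lazily decremented max-pointer t replace all list building/popping (the top of A's stack is always the largest undelivered number <= m).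
import Mathlib
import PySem

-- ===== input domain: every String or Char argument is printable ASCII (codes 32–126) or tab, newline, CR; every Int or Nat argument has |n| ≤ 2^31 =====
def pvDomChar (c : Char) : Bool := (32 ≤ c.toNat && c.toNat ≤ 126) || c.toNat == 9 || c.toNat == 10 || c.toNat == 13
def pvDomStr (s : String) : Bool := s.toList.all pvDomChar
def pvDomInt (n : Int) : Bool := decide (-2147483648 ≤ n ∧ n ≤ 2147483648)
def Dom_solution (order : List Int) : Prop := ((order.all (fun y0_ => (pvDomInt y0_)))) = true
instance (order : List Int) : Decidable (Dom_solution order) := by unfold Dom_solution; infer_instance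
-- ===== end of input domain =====

-- B keeps no stack at all: a boolean delivered-array, the belt watermark m and a max-pointer t
-- replace A's two simulated lists; same return value, measurably faster by a constant factor.

-- ===== PORT A =====
-- the while loop of A; python lists grow/pop at the END (top = getLast)
def solutionLoopA (ans : Int) (ord backup belt : List Int) : Int :=
  if _hor : ord = [] then ans
  else if belt ≠ [] ∧ belt.getLast? = ord.getLast? then
    -- belt.pop(); order.pop(); answer += 1
    solutionLoopA (ans + 1) ord.dropLast backup belt.dropLast
  else if backup ≠ [] ∧ backup.getLast? = ord.getLast? then
    -- backup.pop(); order.pop(); answer += 1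
    solutionLoopA (ans + 1) ord.dropLast backup.dropLast belt
  else if hb : belt ≠ [] then
    -- backup.append(belt.pop())
    solutionLoopA ans ord (backup ++ [belt.getLast hb]) belt.dropLast
  else ans
termination_by ord.length + belt.length
decreasing_by
  · have h2 : belt.length ≠ 0 := by simpa [List.length_eq_zero_iff] using ‹belt ≠ [] ∧ _›.1
    simp [List.length_dropLast]; omega
  · have h1 : ord.length ≠ 0 := by simpa [List.length_eq_zero_iff] using _hor
    simp [List.length_dropLast]; omega
  · have h2 : belt.length ≠ 0 := by simpa [List.length_eq_zero_iff] using hb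
    simp [List.length_dropLast]; omega

def solution (order : List Int) : Int :=
  -- order = order[::-1]
  let ord := order.reverse
  -- belt = [i for i in range(len(order), 0, -1)]
  let belt := (PySem.List.pyRange (order.length : Int) 0 (-1)).map (fun i => i)
  solutionLoopA 0 ord [] belt

-- ===== PORT B =====
-- the inner while of B: 'while t > 0 and delivered[t]: t -= 1'
def skipT (delivered : List Bool) (t : Int) : Int :=
  if h : 0 < t ∧ delivered.getD t.toNat false = true then skipT delivered (t - 1) else t
termination_by t.toNat
decreasing_by omega

-- the outer for of B over the remaining order; state: count, delivered array, watermark m, pointer t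
def solutionLoopB (count : Int) (rest : List Int) (delivered : List Bool) (m t n : Int) : Int :=
  match rest with
  | [] => count
  | o :: rest' =>
    if m < o ∧ o ≤ n then
      solutionLoopB (count + 1) rest' (delivered.set o.toNat true) o
        (if o - 1 > m then o - 1 else t) n
    else if 0 < o ∧ o = t then
      solutionLoopB (count + 1) rest' (delivered.set o.toNat true) m
        (skipT (delivered.set o.toNat true) (t - 1)) n
    else count

def solution_alt (order : List Int) : Int :=
  solutionLoopB 0 order (List.replicate (order.length + 1) false) 0 0 (order.length : Int)

-- ===== PRECONDITION & SPEC =====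
def Spec_solution (order : List Int) (out : Int) : Prop := out = solution_alt order
instance (order : List Int) (out : Int) : Decidable (Spec_solution order out) := by unfold Spec_solution; infer_instance

-- ===== CLAIM (what is proved, stated in full; the proofs are below) =====
def Claim_equal_solution : Prop := ∀ (order : List Int), Dom_solution order → Spec_solution order (solution order)

-- ===== LEMMAS AND PROOFS =====

-- A's backup stack, reconstructed from B's state: the undelivered numbers in [1, m], increasing
def backupOf (delivered : List Bool) (m : Int) : List Int :=
  ((List.range' 1 m.toNat).filter (fun j => !(delivered.getD j false))).map (fun j => Int.ofNat j)

lemma backupOf_nonpos (delivered : List Bool) (m : Int) (h : m ≤ 0) :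
    backupOf delivered m = [] := by
  unfold backupOf
  rw [Int.toNat_of_nonpos h]
  simp

lemma backupOf_snoc (delivered : List Bool) (t : Int) (ht : 0 < t)
    (hd : delivered.getD t.toNat false = false) :
    backupOf delivered t = backupOf delivered (t - 1) ++ [t] := by
  unfold backupOf
  have h1 : t.toNat = (t - 1).toNat + 1 := by omega
  rw [h1, List.range'_concat]
  have h2 : (1 : Nat) + 1 * (t - 1).toNat = t.toNat := by omega
  rw [h2, List.filter_append, List.map_append]
  have hd' : delivered[t.toNat]?.getD false = false := by simpa [List.getD] using hd
  simp [hd', Int.toNat_of_nonneg (le_of_lt ht)]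

lemma backupOf_drop_top (delivered : List Bool) (t : Int) (ht : 0 < t)
    (hd : delivered.getD t.toNat false = true) :
    backupOf delivered t = backupOf delivered (t - 1) := by
  unfold backupOf
  have h1 : t.toNat = (t - 1).toNat + 1 := by omega
  rw [h1, List.range'_concat]
  have h2 : (1 : Nat) + 1 * (t - 1).toNat = t.toNat := by omega
  rw [h2, List.filter_append, List.map_append]
  have hd' : delivered[t.toNat]?.getD false = true := by simpa [List.getD] using hd
  simp [hd']

-- collapse delivered upper segment (t, m]
lemma backupOf_upper (delivered : List Bool) (m t : Int) (h0 : 0 ≤ t) (htm : t ≤ m)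
    (h : ∀ j : Int, t < j → j ≤ m → delivered.getD j.toNat false = true) :
    backupOf delivered m = backupOf delivered t := by
  by_cases hc : m ≤ t
  · have : m = t := le_antisymm hc htm
    rw [this]
  · push_neg at hc
    rw [backupOf_drop_top delivered m (by omega) (h m hc le_rfl)]
    exact backupOf_upper delivered (m - 1) t h0 (by omega)
      (fun j h1 h2 => h j h1 (by omega))
termination_by (m - t).toNat
decreasing_by omega

-- setting an index above k does not change backupOf _ k
lemma backupOf_set_high (delivered : List Bool) (k i : Int) (hk : 0 ≤ k) (hki : k < i) :
    backupOf (delivered.set i.toNat true) k = backupOf delivered k := by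
  unfold backupOf
  have hfil : List.filter (fun j => !((delivered.set i.toNat true).getD j false)) (List.range' 1 k.toNat)
      = List.filter (fun j => !(delivered.getD j false)) (List.range' 1 k.toNat) := by
    apply List.filter_congr
    intro j hj
    have hjk : j ≤ k.toNat := by
      have := List.mem_range'.mp hj
      omega
    have hne : i.toNat ≠ j := by omega
    simp [List.getD, List.getElem?_set_ne hne]
  rw [hfil]

-- appending the freshly pushed range (m, o) of undelivered numbers
lemma backupOf_push (delivered : List Bool) (m o : Int) (h0 : 0 ≤ m) (hmo : m ≤ o - 1)
    (h : ∀ j : Int, m < j → j < o → delivered.getD j.toNat false = false) :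
    backupOf delivered (o - 1) = backupOf delivered m ++ PySem.List.pyRange (m + 1) o 1 := by
  by_cases hc : o - 1 ≤ m
  · have : o - 1 = m := le_antisymm hc hmo
    rw [this, PySem.List.pyRange_one_eq_nil (by omega)]
    simp
  · push_neg at hc
    rw [backupOf_snoc delivered (o - 1) (by omega) (h (o - 1) (by omega) (by omega))]
    have ih := backupOf_push delivered m (o - 1) h0 (by omega)
      (fun j h1 h2 => h j h1 (by omega))
    have : o - 1 - 1 = o - 2 := by ring
    rw [ih, List.append_assoc]
    congr 1
    rw [← PySem.List.pyRange_one_succ_right (a := m + 1) (b := o - 1) (by omega)]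
    norm_num
termination_by (o - 1 - m).toNat
decreasing_by omega

lemma skipT_spec (delivered : List Bool) (t : Int) (ht : 0 ≤ t) :
    0 ≤ skipT delivered t ∧ skipT delivered t ≤ t ∧
      (skipT delivered t = 0 ∨ delivered.getD (skipT delivered t).toNat false = false) ∧
      (∀ j : Int, skipT delivered t < j → j ≤ t → delivered.getD j.toNat false = true) := by
  rw [skipT]
  by_cases h : 0 < t ∧ delivered.getD t.toNat false = true
  · rw [dif_pos h]
    obtain ⟨h1, h2, h3, h4⟩ := skipT_spec delivered (t - 1) (by omega)
    refine ⟨h1, by omega, h3, ?_⟩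
    intro j hj1 hj2
    by_cases hjt : j ≤ t - 1
    · exact h4 j hj1 hjt
    · have : j = t := by omega
      rw [this]; exact h.2
  · rw [dif_neg h]
    refine ⟨ht, le_rfl, ?_, by intro j h1 h2; omega⟩
    by_cases h0 : t = 0
    · exact Or.inl h0
    · right
      by_contra hc
      exact h ⟨by omega, by simpa using hc⟩
  termination_by t.toNat
  decreasing_by omega

-- countdown-belt facts
lemma pyRange_neg_one_ne_nil {a b : Int} (h : b < a) :
    PySem.List.pyRange a b (-1) ≠ [] := by
  rw [PySem.List.pyRange_neg_one_cons h]; simp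

lemma getLast?_pyRange_neg_one {a b : Int} (h : b < a) :
    (PySem.List.pyRange a b (-1)).getLast? = some (b + 1) := by
  rw [PySem.List.pyRange_neg_one_eq_reverse, List.getLast?_reverse,
    PySem.List.pyRange_one_cons (by omega)]
  rfl

lemma dropLast_pyRange_neg_one {a b : Int} (h : b < a) :
    (PySem.List.pyRange a b (-1)).dropLast = PySem.List.pyRange a (b + 1) (-1) := by
  rw [PySem.List.pyRange_neg_one_eq_reverse, PySem.List.pyRange_neg_one_eq_reverse,
    PySem.List.pyRange_one_cons (show b + 1 < a + 1 by omega)]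
  simp

-- A feeds belt boxes m+1 .. o-1 to the backup, then delivers o from the belt
lemma loopA_push_deliver (N : Int) (ans : Int) (ord backup : List Int) (o m : Int)
    (hord : ord ≠ []) (hlast : ord.getLast? = some o)
    (hmo : m < o) (hoN : o ≤ N)
    (hbt : backup.getLast? ≠ some o) :
    solutionLoopA ans ord backup (PySem.List.pyRange N m (-1)) =
      solutionLoopA (ans + 1) ord.dropLast (backup ++ PySem.List.pyRange (m + 1) o 1)
        (PySem.List.pyRange N o (-1)) := by
  have hmN : m < N := by omega
  by_cases hc : o = m + 1
  · -- belt top is o: deliver immediately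
    rw [solutionLoopA]
    rw [dif_neg (by simpa using hord)]
    rw [if_pos ⟨pyRange_neg_one_ne_nil hmN, by
      rw [getLast?_pyRange_neg_one hmN, hlast, hc]⟩]
    rw [dropLast_pyRange_neg_one hmN, PySem.List.pyRange_one_eq_nil (by omega), hc]
    simp
  · -- push belt top m+1, recurse
    rw [solutionLoopA]
    rw [dif_neg (by simpa using hord)]
    rw [if_neg (by
      rintro ⟨-, heq⟩
      rw [getLast?_pyRange_neg_one hmN, hlast] at heq
      have := Option.some.inj heq; omega)]
    rw [if_neg (by rw [hlast]; rintro ⟨-, heq⟩; exact hbt heq)]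
    rw [dif_pos (pyRange_neg_one_ne_nil hmN)]
    have hgl : (PySem.List.pyRange N m (-1)).getLast (pyRange_neg_one_ne_nil hmN) = m + 1 := by
      have h := getLast?_pyRange_neg_one (a := N) (b := m) hmN
      rw [List.getLast?_eq_some_getLast (pyRange_neg_one_ne_nil hmN)] at h
      exact Option.some.inj h
    rw [hgl, dropLast_pyRange_neg_one hmN]
    have ih := loopA_push_deliver N ans ord (backup ++ [m + 1]) o (m + 1)
      hord hlast (by omega) hoN (by simp; omega)
    rw [ih, List.append_assoc]
    congr 2
    rw [PySem.List.pyRange_one_cons (a := m + 1) (by omega)]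
    rfl
termination_by (o - m).toNat
decreasing_by omega

-- no match anywhere: A dumps the whole belt onto the backup and breaks
lemma loopA_break (N : Int) (ans : Int) (ord backup : List Int) (o m : Int)
    (hord : ord ≠ []) (hlast : ord.getLast? = some o)
    (hmN : m ≤ N) (ho : ¬(m < o ∧ o ≤ N))
    (hbt : backup.getLast? ≠ some o) :
    solutionLoopA ans ord backup (PySem.List.pyRange N m (-1)) = ans := by
  by_cases hc : m < N
  · rw [solutionLoopA]
    rw [dif_neg (by simpa using hord)]
    rw [if_neg (by
      rintro ⟨-, heq⟩
      rw [getLast?_pyRange_neg_one hc, hlast] at heq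
      have := Option.some.inj heq
      exact ho ⟨by omega, by omega⟩)]
    rw [if_neg (by rw [hlast]; rintro ⟨-, heq⟩; exact hbt heq)]
    rw [dif_pos (pyRange_neg_one_ne_nil hc)]
    have hgl : (PySem.List.pyRange N m (-1)).getLast (pyRange_neg_one_ne_nil hc) = m + 1 := by
      have h := getLast?_pyRange_neg_one (a := N) (b := m) hc
      rw [List.getLast?_eq_some_getLast (pyRange_neg_one_ne_nil hc)] at h
      exact Option.some.inj h
    rw [hgl, dropLast_pyRange_neg_one hc]
    exact loopA_break N ans ord (backup ++ [m + 1]) o (m + 1) hord hlast (by omega)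
      (fun ⟨h1, h2⟩ => ho ⟨by omega, h2⟩) (by simp; rintro rfl; exact ho ⟨by omega, by omega⟩)
  · have hmN' : m = N := le_antisymm hmN (by omega)
    rw [solutionLoopA]
    rw [dif_neg (by simpa using hord)]
    rw [if_neg (by
      rintro ⟨hne, -⟩
      exact hne (PySem.List.pyRange_neg_one_eq_nil (by omega)))]
    rw [if_neg (by rw [hlast]; rintro ⟨-, heq⟩; exact hbt heq)]
    rw [dif_neg (by simp [PySem.List.pyRange_neg_one_eq_nil (le_of_eq hmN'.symm)])]
termination_by (N - m).toNat
decreasing_by omega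

-- main bisimulation: A's stack state is backupOf delivered m; B's pointer t is its top
lemma loopA_eq_loopB (N : Int) (ord : List Int) (delivered : List Bool) (m t ans : Int)
    (h0t : 0 ≤ t) (htm : t ≤ m) (hmN : m ≤ N)
    (hlen : delivered.length = N.toNat + 1)
    (hset : ∀ j : Int, t < j → (delivered.getD j.toNat false = true ↔ j ≤ m))
    (htd : t = 0 ∨ delivered.getD t.toNat false = false) :
    solutionLoopA ans ord (backupOf delivered m) (PySem.List.pyRange N m (-1)) =
      solutionLoopB ans ord.reverse delivered m t N := by
  by_cases hor : ord = []
  · subst hor; rw [solutionLoopA]; simp [solutionLoopB]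
  · obtain ⟨l, o, rfl⟩ : ∃ l o, ord = l ++ [o] := by
      rcases List.eq_nil_or_concat ord with h | ⟨l, o, h⟩
      · exact absurd h hor
      · exact ⟨l, o, by simpa using h⟩
    have hrev : (l ++ [o]).reverse = o :: l.reverse := by simp
    have hlast : (l ++ [o]).getLast? = some o := by simp
    have hdrop : (l ++ [o]).dropLast = l := by simp
    -- the backup top is t (or the backup is empty when t = 0)
    have hbu : backupOf delivered m = backupOf delivered t :=
      backupOf_upper delivered m t h0t htm (fun j h1 h2 => (hset j h1).mpr h2)
    have hbshape : (t = 0 ∧ backupOf delivered m = []) ∨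
        (0 < t ∧ backupOf delivered m = backupOf delivered (t - 1) ++ [t]) := by
      rcases htd with h0 | hfalse
      · exact Or.inl ⟨h0, by rw [hbu, h0]; exact backupOf_nonpos _ _ le_rfl⟩
      · by_cases h0 : t = 0
        · exact Or.inl ⟨h0, by rw [hbu, h0]; exact backupOf_nonpos _ _ le_rfl⟩
        · exact Or.inr ⟨by omega, by rw [hbu]; exact backupOf_snoc delivered t (by omega) hfalse⟩
    by_cases hcase1 : m < o ∧ o ≤ N
    · -- deliver from the belt
      have hbtop : (backupOf delivered m).getLast? ≠ some o := by
        rcases hbshape with ⟨-, he⟩ | ⟨-, he⟩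
        · rw [he]; simp
        · rw [he]; simp; omega
      rw [loopA_push_deliver N ans (l ++ [o]) (backupOf delivered m) o m hor hlast
        hcase1.1 hcase1.2 hbtop, hdrop]
      have hoN : o.toNat < delivered.length := by omega
      set delivered' := delivered.set o.toNat true with hd'
      have hget' : ∀ j : Int, 0 ≤ j → j ≠ o →
          delivered'.getD j.toNat false = delivered.getD j.toNat false := by
        intro j hj hne
        have : o.toNat ≠ j.toNat := by omega
        simp [hd', List.getD, List.getElem?_set_ne this]
      have hgeto : delivered'.getD o.toNat false = true := by
        simp [hd', List.getD, List.getElem?_set_self, hoN]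
      -- the new backup equals backupOf delivered' o
      have hnew : backupOf delivered m ++ PySem.List.pyRange (m + 1) o 1 =
          backupOf delivered' o := by
        have h1 : backupOf delivered' o = backupOf delivered' (o - 1) :=
          backupOf_drop_top delivered' o (by omega) hgeto
        have h2 : backupOf delivered' (o - 1) =
            backupOf delivered' m ++ PySem.List.pyRange (m + 1) o 1 :=
          backupOf_push delivered' m o (by omega) (by omega) (by
            intro j hj1 hj2
            rw [hget' j (by omega) (by omega)]
            by_contra hcon
            have := (hset j (by omega)).mp (by simpa using hcon)
            omega)
        have h3 : backupOf delivered' m = backupOf delivered m :=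
          backupOf_set_high delivered m o (by omega) hcase1.1
        rw [h1, h2, h3]
      rw [hnew]
      -- recurse with the updated B state
      set t' := if o - 1 > m then o - 1 else t with ht'
      have ih := loopA_eq_loopB N l delivered' o t' (ans + 1)
        (by by_cases h : o - 1 > m <;> simp [ht', h] <;> omega)
        (by by_cases h : o - 1 > m <;> simp [ht', h] <;> omega)
        hcase1.2
        (by simp [hd', hlen])
        (by
          intro j hj
          by_cases hjo : j = o
          · subst hjo; rw [hgeto]; simp
          · by_cases hjbig : o < j
            · rw [hget' j (by omega) hjo]
              constructor
              · intro h; have := (hset j (by omega)).mp h; omega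
              · omega
            · -- t' < j < o, j ≠ o: j ≤ o - 1
              have hj1 : j < o := by omega
              rw [hget' j (by omega) hjo]
              by_cases hcm : o - 1 > m
              · -- t' = o - 1, so t' < j < o impossible
                exfalso; rw [ht'] at hj; simp [hcm] at hj; omega
              · -- o = m + 1, t' = t
                rw [ht'] at hj; simp [hcm] at hj
                constructor
                · intro h; have := (hset j hj).mp h; omega
                · intro h; exact (hset j hj).mpr (by omega))
        (by
          by_cases hcm : o - 1 > m
          · right
            rw [ht', if_pos hcm, hget' (o - 1) (by omega) (by omega)]
            by_contra hcon
            have := (hset (o - 1) (by omega)).mp (by simpa using hcon)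
            omega
          · rw [ht', if_neg hcm]
            rcases htd with h0 | hfalse
            · exact Or.inl h0
            · right; rw [hget' t h0t (by omega)]; exact hfalse)
      rw [ih, hrev, solutionLoopB]
      rw [if_pos hcase1]
    · by_cases hcase2 : 0 < o ∧ o = t
      · -- deliver from the backup
        obtain ⟨ho0, rfl⟩ := hcase2
        obtain ⟨hc, he⟩ : 0 < o ∧ backupOf delivered m = backupOf delivered (o - 1) ++ [o] := by
          rcases hbshape with ⟨h0, -⟩ | ⟨h1, h2⟩
          · omega
          · exact ⟨h1, h2⟩
        rw [solutionLoopA]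
        rw [dif_neg (by simpa using hor)]
        rw [if_neg (by
          rintro ⟨hne, heq⟩
          by_cases hmlt : m < N
          · rw [getLast?_pyRange_neg_one hmlt, hlast] at heq
            have := Option.some.inj heq; omega
          · exact hne (PySem.List.pyRange_neg_one_eq_nil (by omega)))]
        rw [if_pos (by rw [he, hlast]; simp)]
        rw [hdrop, he]
        simp only [List.dropLast_concat]
        have hoN : o.toNat < delivered.length := by omega
        set delivered' := delivered.set o.toNat true with hd'
        have hget' : ∀ j : Int, 0 ≤ j → j ≠ o →
            delivered'.getD j.toNat false = delivered.getD j.toNat false := by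
          intro j hj hne
          have : o.toNat ≠ j.toNat := by omega
          simp [hd', List.getD, List.getElem?_set_ne this]
        have hgeto : delivered'.getD o.toNat false = true := by
          simp [hd', List.getD, List.getElem?_set_self, hoN]
        set t' := skipT delivered' (o - 1) with ht'
        obtain ⟨hs0, hs1, hs2, hs3⟩ := skipT_spec delivered' (o - 1) (by omega)
        -- backupOf delivered (o-1) = backupOf delivered' m
        have hb1 : backupOf delivered (o - 1) = backupOf delivered' (o - 1) :=
          (backupOf_set_high delivered (o - 1) o (by omega) (by omega)).symm
        have hb2 : backupOf delivered' (o - 1) = backupOf delivered' t' :=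
          backupOf_upper delivered' (o - 1) t' hs0 hs1 (fun j h1 h2 => hs3 j h1 h2)
        have hb3 : backupOf delivered' m = backupOf delivered' t' :=
          backupOf_upper delivered' m t' hs0 (by omega) (by
            intro j hj1 hj2
            by_cases hjo : j = o
            · subst hjo; exact hgeto
            · by_cases hjlt : j ≤ o - 1
              · exact hs3 j hj1 hjlt
              · rw [hget' j (by omega) hjo]
                exact (hset j (by omega)).mpr hj2)
        have ih := loopA_eq_loopB N l delivered' m t' (ans + 1)
          hs0 (by omega) hmN (by simp [hd', hlen])
          (by
            intro j hj
            by_cases hjo : j = o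
            · subst hjo; rw [hgeto]; simp; omega
            · by_cases hjlt : j ≤ o - 1
              · rw [hs3 j hj hjlt]; simp; omega
              · rw [hget' j (by omega) hjo]
                exact hset j (by omega))
          hs2
        rw [hb1, hb2, ← hb3, ih, hrev, solutionLoopB]
        rw [if_neg (by rintro ⟨h1, -⟩; omega), if_pos (by omega)]
      · -- break
        have hbtop : (backupOf delivered m).getLast? ≠ some o := by
          rcases hbshape with ⟨-, he⟩ | ⟨h1, he⟩
          · rw [he]; simp
          · rw [he]; simp; intro heq; exact hcase2 ⟨by omega, heq.symm⟩
        rw [loopA_break N ans (l ++ [o]) (backupOf delivered m) o m hor hlast hmN hcase1 hbtop]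
        rw [hrev, solutionLoopB]
        rw [if_neg hcase1, if_neg hcase2]
termination_by ord.length
decreasing_by all_goals (subst_vars; simp)

-- ===== VERDICT (by name: the statement is the Claim_ definition above) =====
theorem solution_spec : Claim_equal_solution := by
  intro order _
  show solution order = solution_alt order
  unfold solution solution_alt
  simp only [List.map_id']
  have h := loopA_eq_loopB (order.length : Int) order.reverse
    (List.replicate (order.length + 1) false) 0 0 0
    le_rfl le_rfl (by exact_mod_cast Int.ofNat_nonneg order.length)
    (by simp)
    (by intro j hj; simp [List.getD]; omega)
    (Or.inl rfl)
  rw [backupOf_nonpos _ _ le_rfl] at h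
  simpa using h
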